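-- pv_equiv track=rewrite | github.com/DaniellaGuerra6/TAREA_ENTIDADES | src/1_CLASIFICAR.py | limpiar_inicio
-- ===== SOURCE A (Python) =====
-- def limpiar_inicio(sentence: str, palabras_ini: list) -> str:
--     if not isinstance(sentence, str):
--         return sentence
--
--     sentence = sentence.strip()
--
--     while True:
--         partes = sentence.split(maxsplit=1)
--         if partes and partes[0].lower() in palabras_ini:
--             sentence = partes[1] if len(partes) > 1 else ""
--         else:
--             break
--     return sentence
-- ===== SOURCE B (Python) =====
-- def limpiar_inicio(sentence: str, palabras_ini: list) -> str:
--     if not isinstance(sentence, str):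
--         return sentence
--
--     sentence = sentence.strip()
--     words = sentence.split()
--     i = 0
--     while i < len(words) and words[i].lower() in palabras_ini:
--         i += 1
--     if i == 0:
--         return sentence
--     partes = sentence.split(maxsplit=i)
--     return partes[i] if len(partes) > i else ""
-- ===== Notes on version B (the rewrite author's own statement) =====
-- stated objective: alternative
-- what changed: B tokenizes the stripped sentence once, counts the length i of the leading run of words whose lower() is in palabras_ini, and removes them all with a single split(maxsplit=i), instead of A's loop that re-splits and reslices the remaining string once per removed word.
import Mathlib
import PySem

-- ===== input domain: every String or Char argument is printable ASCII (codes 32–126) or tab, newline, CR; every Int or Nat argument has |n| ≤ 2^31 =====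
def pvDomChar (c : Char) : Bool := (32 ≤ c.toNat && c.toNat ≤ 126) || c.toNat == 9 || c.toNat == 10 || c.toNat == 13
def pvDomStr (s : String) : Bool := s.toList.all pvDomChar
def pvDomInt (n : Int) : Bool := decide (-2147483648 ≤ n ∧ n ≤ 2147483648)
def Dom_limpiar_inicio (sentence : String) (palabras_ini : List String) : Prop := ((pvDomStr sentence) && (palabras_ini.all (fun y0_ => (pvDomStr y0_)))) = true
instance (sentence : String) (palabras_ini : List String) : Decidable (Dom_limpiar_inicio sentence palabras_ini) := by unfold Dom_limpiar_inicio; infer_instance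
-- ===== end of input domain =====

-- B strips once, counts the run of leading words whose lower() is listed, and removes them all with a
-- single split(maxsplit=i), instead of A's repeated split(maxsplit=1)-and-reslice loop (objective: alternative).

-- ===== PORT A =====
-- pvWord/pvRest/pvWordsMax and the lemmas up to pvSplit_tail_lt are here (not with the proofs)
-- only because port A's while-loop cites pvSplit_tail_lt by name in its decreasing_by.
def pvWord (l : List Char) : List Char := l.takeWhile (fun c => !PySem.Chars.isspace c)

def pvRest (l : List Char) : List Char := l.dropWhile (fun c => !PySem.Chars.isspace c)

lemma pvRest_dropWhile_lt (l : List Char) (h : l.dropWhile PySem.Chars.isspace ≠ []) :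
    (pvRest (l.dropWhile PySem.Chars.isspace)).length < l.length := by
  rcases ht : l.dropWhile PySem.Chars.isspace with _ | ⟨c, cs⟩
  · exact absurd ht h
  · have hc : PySem.Chars.isspace c = false := by
      have := List.head_dropWhile_not PySem.Chars.isspace (l := l) (by simp [ht])
      simpa [ht] using this
  
    have h1 : (pvRest (c :: cs)).length ≤ cs.length := by
      simp [pvRest, List.dropWhile_cons, hc, List.length_dropWhile_le]
    have h2 : (c :: cs).length ≤ l.length := by
      rw [← ht]; exact List.length_dropWhile_le _ _
    simp at h2; omega

def pvWordsMax (m : Nat) (l : List Char) : List (List Char) :=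
  let t := l.dropWhile PySem.Chars.isspace
  if t = [] then []
  else if m = 0 then [t]
  else pvWord t :: pvWordsMax (m - 1) (pvRest t)
termination_by l.length
decreasing_by
  rename_i h1 h2
  exact pvRest_dropWhile_lt l h1

lemma pvWordsMax_of_nil (m : Nat) (l : List Char) (h : l.dropWhile PySem.Chars.isspace = []) :
    pvWordsMax m l = [] := by
  rw [pvWordsMax]; simp [h]

lemma pvWordsMax_zero (l : List Char) (h : l.dropWhile PySem.Chars.isspace ≠ []) :
    pvWordsMax 0 l = [l.dropWhile PySem.Chars.isspace] := by
  rw [pvWordsMax]; simp [h]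

lemma pvWordsMax_pos (m : Nat) (l : List Char) (h : l.dropWhile PySem.Chars.isspace ≠ [])
    (hm : m ≠ 0) :
    pvWordsMax m l = pvWord (l.dropWhile PySem.Chars.isspace) ::
      pvWordsMax (m - 1) (pvRest (l.dropWhile PySem.Chars.isspace)) := by
  rw [pvWordsMax]; simp [h, hm]

lemma pvGoMax_spec : ∀ (fuel m : Nat) (l : List Char) (acc : List (List Char)),
    l.length < fuel →
    PySem.Chars.split₀Max.go fuel m l acc = acc.reverse ++ pvWordsMax m l := by
  intro fuel
  induction fuel with
  | zero => intro m l acc h; omega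
  | succ n ih =>
    intro m l acc h
    rw [PySem.Chars.split₀Max.go]
    rcases ht : l.dropWhile PySem.Chars.isspace with _ | ⟨c, cs⟩
    · rw [pvWordsMax_of_nil m l ht]; simp
    · simp only [ht]
      by_cases hm : m = 0
      · rw [hm, pvWordsMax_zero l (by simp [ht]), ht]; simp
      · have hlt : (c :: cs).length ≤ l.length := by
          rw [← ht]; exact List.length_dropWhile_le _ _
        have hrec : (List.dropWhile (fun c => !PySem.Chars.isspace c) (c :: cs)).length < n := by
          have h3 := pvRest_dropWhile_lt l (by simp [ht])
          rw [ht] at h3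
          simp only [pvRest] at h3
          omega
        rw [if_neg hm, ih (m - 1) _ _ hrec]
        rw [pvWordsMax_pos m l (by simp [ht]) hm, ht]
        simp [pvWord, pvRest]

lemma pvSplit₀Max_eq (l : List Char) (m : Nat) :
    PySem.Chars.split₀Max l (m : Int) = pvWordsMax m l := by
  rw [PySem.Chars.split₀Max]
  rw [if_neg (by omega)]
  simpa using pvGoMax_spec (l.length + 1) ((m : Int)).toNat l [] (by omega)

lemma pvStrSplit₀Max_eq (s : String) (m : Nat) :
    PySem.Str.split₀Max s (m : Int) = List.map String.ofList (pvWordsMax m s.toList) := by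
  rw [PySem.Str.split₀Max, pvSplit₀Max_eq]

lemma pvStrSplit₀Max_one (s : String) :
    PySem.Str.split₀Max s 1 = List.map String.ofList (pvWordsMax 1 s.toList) := by
  have := pvStrSplit₀Max_eq s 1
  simpa using this

lemma pvSplit_tail_lt (s : String) (h : PySem.Str.split₀Max s 1 ≠ []) :
    ((PySem.Str.split₀Max s 1).tail.headD "").toList.length < s.toList.length := by
  rw [pvStrSplit₀Max_one] at h ⊢
  rcases ht : s.toList.dropWhile PySem.Chars.isspace with _ | ⟨c, cs⟩
  · rw [pvWordsMax_of_nil 1 s.toList ht] at h; simp at h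
  · have hne : s.toList.dropWhile PySem.Chars.isspace ≠ [] := by simp [ht]
    have hlt := pvRest_dropWhile_lt s.toList hne
    rw [pvWordsMax_pos 1 s.toList hne (by omega)]
    rcases hu : (pvRest (s.toList.dropWhile PySem.Chars.isspace)).dropWhile PySem.Chars.isspace
        with _ | ⟨d, ds⟩
    · rw [pvWordsMax_of_nil 0 _ hu]
      have h2 : (c :: cs).length ≤ s.toList.length := by
        rw [← ht]; exact List.length_dropWhile_le _ _
      simp [String.toList_empty] at h2 ⊢; simp at hlt
      omega
    · rw [pvWordsMax_zero _ (by simp [hu]), hu]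
      have h3 : (d :: ds).length ≤ (pvRest (s.toList.dropWhile PySem.Chars.isspace)).length := by
        rw [← hu]; exact List.length_dropWhile_le _ _
      simp [String.toList_ofList] at h3 hlt ⊢
      omega

def limpiarA_loop (palabras_ini : List String) (s : String) : String :=
  let partes := PySem.Str.split₀Max s 1
  if h : partes ≠ [] ∧ PySem.Str.lower (partes.headD "") ∈ palabras_ini then
    limpiarA_loop palabras_ini (partes.tail.headD "")
  else s
termination_by s.toList.length
decreasing_by exact pvSplit_tail_lt s h.1

def limpiar_inicio (sentence : String) (palabras_ini : List String) : String :=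
  limpiarA_loop palabras_ini (PySem.Str.strip sentence)

-- ===== PORT B =====
def limpiar_inicio_alt (sentence : String) (palabras_ini : List String) : String :=
  let s := PySem.Str.strip sentence
  let words := PySem.Str.split₀ s
  let i := (words.takeWhile (fun w => decide (PySem.Str.lower w ∈ palabras_ini))).length
  if i = 0 then s
  else
    let partes := PySem.Str.split₀Max s (i : Int)
    if i < partes.length then partes.getD i "" else ""

-- B's body after the initial strip, as a standalone function of the stripped string

-- ===== PRECONDITION & SPEC =====
def Spec_limpiar_inicio (sentence : String) (palabras_ini : List String) (out : String) : Prop := out = limpiar_inicio_alt sentence palabras_ini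
instance (sentence : String) (palabras_ini : List String) (out : String) : Decidable (Spec_limpiar_inicio sentence palabras_ini out) := by unfold Spec_limpiar_inicio; infer_instance

-- ===== CLAIM (what is proved, stated in full; the proofs are below) =====
def Claim_equal_limpiar_inicio : Prop := ∀ (sentence : String) (palabras_ini : List String), Dom_limpiar_inicio sentence palabras_ini → Spec_limpiar_inicio sentence palabras_ini (limpiar_inicio sentence palabras_ini)

-- ===== LEMMAS AND PROOFS =====
def pvAltCore (palabras_ini : List String) (s : String) : String :=
  let words := PySem.Str.split₀ s
  let i := (words.takeWhile (fun w => decide (PySem.Str.lower w ∈ palabras_ini))).length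
  if i = 0 then s
  else
    let partes := PySem.Str.split₀Max s (i : Int)
    if i < partes.length then partes.getD i "" else ""

lemma pvAlt_eq (sentence : String) (P : List String) :
    limpiar_inicio_alt sentence P = pvAltCore P (PySem.Str.strip sentence) := rfl

def pvWords (l : List Char) : List (List Char) :=
  let t := l.dropWhile PySem.Chars.isspace
  if t = [] then [] else pvWord t :: pvWords (pvRest t)
termination_by l.length
decreasing_by
  rename_i h1
  exact pvRest_dropWhile_lt l h1

lemma pvWords_of_nil (l : List Char) (h : l.dropWhile PySem.Chars.isspace = []) :
    pvWords l = [] := by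
  rw [pvWords]; simp [h]

lemma pvWords_cons_word (l : List Char) (h : l.dropWhile PySem.Chars.isspace ≠ []) :
    pvWords l = pvWord (l.dropWhile PySem.Chars.isspace) ::
      pvWords (pvRest (l.dropWhile PySem.Chars.isspace)) := by
  rw [pvWords]; simp [h]

lemma pvWords_congr (l₁ l₂ : List Char)
    (h : l₁.dropWhile PySem.Chars.isspace = l₂.dropWhile PySem.Chars.isspace) :
    pvWords l₁ = pvWords l₂ := by
  by_cases h1 : l₁.dropWhile PySem.Chars.isspace = []
  · rw [pvWords_of_nil l₁ h1, pvWords_of_nil l₂ (h ▸ h1)]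
  · rw [pvWords_cons_word l₁ h1, pvWords_cons_word l₂ (h ▸ h1), h]

lemma pvWordsMax_congr (m : Nat) (l₁ l₂ : List Char)
    (h : l₁.dropWhile PySem.Chars.isspace = l₂.dropWhile PySem.Chars.isspace) :
    pvWordsMax m l₁ = pvWordsMax m l₂ := by
  by_cases h1 : l₁.dropWhile PySem.Chars.isspace = []
  · rw [pvWordsMax_of_nil m l₁ h1, pvWordsMax_of_nil m l₂ (h ▸ h1)]
  · by_cases hm : m = 0
    · rw [hm, pvWordsMax_zero l₁ h1, pvWordsMax_zero l₂ (h ▸ h1), h]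
    · rw [pvWordsMax_pos m l₁ h1 hm, pvWordsMax_pos m l₂ (h ▸ h1) hm, h]

lemma pvWords_cons_space (c : Char) (l : List Char) (hc : PySem.Chars.isspace c = true) :
    pvWords (c :: l) = pvWords l := by
  exact pvWords_congr _ _ (by simp [List.dropWhile_cons, hc])

lemma pvWords_lstrip (l : List Char) :
    pvWords (l.dropWhile PySem.Chars.isspace) = pvWords l := by
  exact pvWords_congr _ _ (List.dropWhile_idempotent _ _)

lemma pvWordsMax_lstrip (m : Nat) (l : List Char) :
    pvWordsMax m (l.dropWhile PySem.Chars.isspace) = pvWordsMax m l := by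
  exact pvWordsMax_congr m _ _ (List.dropWhile_idempotent _ _)

def pvWordsPre (p : List Char) (l : List Char) : List (List Char) :=
  if p = [] then pvWords l else (p ++ pvWord l) :: pvWords (pvRest l)

lemma pvGo₀_spec : ∀ (l cur : List Char) (acc : List (List Char)),
    PySem.Chars.split₀.go l cur acc = acc.reverse ++ pvWordsPre cur.reverse l := by
  intro l
  induction l with
  | nil =>
    intro cur acc
    rw [PySem.Chars.split₀.go, pvWordsPre]
    by_cases hc : cur = []
    · simp [hc, pvWords_of_nil [] (by simp)]
    · rw [if_neg (by simpa using hc), if_neg (by simpa using hc)]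
      rw [pvWords_of_nil (pvRest []) (by simp [pvRest])]
      simp [pvWord]
  | cons c rest ih =>
    intro cur acc
    rw [PySem.Chars.split₀.go]
    by_cases hs : PySem.Chars.isspace c = true
    · rw [if_pos hs]
      by_cases hc : cur = []
      · subst hc
        simp only [List.isEmpty_nil, if_pos rfl]
        rw [ih [] acc, pvWordsPre, pvWordsPre]
        simp [pvWords_cons_space c rest hs]
      · rw [if_neg (by simpa using hc)]
        rw [ih [] (cur.reverse :: acc), pvWordsPre, pvWordsPre]
        simp only [List.reverse_nil, if_true]
        rw [if_neg (by simpa using hc)]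
        have h1 : pvWord (c :: rest) = [] := by
          simp [pvWord, List.takeWhile_cons, hs]
        have h2 : pvRest (c :: rest) = c :: rest := by
          simp [pvRest, List.dropWhile_cons, hs]
        rw [h1, h2, pvWords_cons_space c rest hs]
        simp
    · have hs' : PySem.Chars.isspace c = false := by simpa using hs
      rw [if_neg (by simp [hs'])]
      rw [ih (c :: cur) acc]
      have hdw : (c :: rest).dropWhile PySem.Chars.isspace = c :: rest := by
        simp [List.dropWhile_cons, hs']
      have hw : pvWord (c :: rest) = c :: pvWord rest := by
        simp [pvWord, List.takeWhile_cons, hs']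
      have hr : pvRest (c :: rest) = pvRest rest := by
        simp [pvRest, List.dropWhile_cons, hs']
      have hRHS : pvWordsPre cur.reverse (c :: rest)
          = (cur.reverse ++ (c :: pvWord rest)) :: pvWords (pvRest rest) := by
        by_cases hc : cur = []
        · subst hc
          rw [pvWordsPre]
          simp only [List.reverse_nil, if_true]
          rw [pvWords_cons_word (c :: rest) (by simp [hdw]), hdw, hw, hr]
          simp
        · rw [pvWordsPre, if_neg (by simpa using hc), hw, hr]
      rw [hRHS, pvWordsPre, if_neg (by simp)]
      simp [pvWord, pvRest]

lemma pvSplit₀_eq (l : List Char) : PySem.Chars.split₀ l = pvWords l := by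
  rw [PySem.Chars.split₀]
  simpa [pvWordsPre] using pvGo₀_spec l [] []

lemma pvStrSplit₀_eq (s : String) :
    PySem.Str.split₀ s = List.map String.ofList (pvWords s.toList) := by
  rw [PySem.Str.split₀, pvSplit₀_eq]

lemma pvMaster (P : List String) : ∀ (n : Nat) (s : String), s.toList.length ≤ n →
    limpiarA_loop P s = pvAltCore P s := by
  intro n
  induction n with
  | zero =>
    intro s hn
    have h0 : s.toList.dropWhile PySem.Chars.isspace = [] := by
      have := List.length_dropWhile_le PySem.Chars.isspace s.toList
      have : (s.toList.dropWhile PySem.Chars.isspace).length = 0 := by omega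
      exact List.eq_nil_of_length_eq_zero this
    rw [limpiarA_loop, pvAltCore]
    rw [pvStrSplit₀Max_one, pvWordsMax_of_nil 1 _ h0, pvStrSplit₀_eq, pvWords_of_nil _ h0]
    simp
  | succ n ih =>
    intro s hn
    by_cases h0 : s.toList.dropWhile PySem.Chars.isspace = []
    · rw [limpiarA_loop, pvAltCore]
      rw [pvStrSplit₀Max_one, pvWordsMax_of_nil 1 _ h0, pvStrSplit₀_eq, pvWords_of_nil _ h0]
      simp
    · -- the stripped-left string starts with a word w₀
      set t := s.toList with hts
      set w₀ := pvWord (t.dropWhile PySem.Chars.isspace) with hw₀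
      set r := pvRest (t.dropWhile PySem.Chars.isspace) with hr
      have hW : pvWords t = w₀ :: pvWords r := pvWords_cons_word t h0
      have hM1 : pvWordsMax 1 t = w₀ :: pvWordsMax 0 r := pvWordsMax_pos 1 t h0 (by omega)
      have hpartes1 : PySem.Str.split₀Max s 1
          = String.ofList w₀ :: List.map String.ofList (pvWordsMax 0 r) := by
        rw [pvStrSplit₀Max_one, ← hts, hM1]; simp
      by_cases hb : PySem.Str.lower (String.ofList w₀) ∈ P
      · -- the first word is removed by both programs
        have hrlt : r.length < t.length := pvRest_dropWhile_lt t h0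
        -- the string handed to A's next iteration
        have hnext : ∃ su : String, (PySem.Str.split₀Max s 1).tail.headD "" = su ∧
            su.toList = r.dropWhile PySem.Chars.isspace := by
          rcases hu : r.dropWhile PySem.Chars.isspace with _ | ⟨d, ds⟩
          · exact ⟨"", by rw [hpartes1, pvWordsMax_of_nil 0 _ hu]; simp,
              by simp [String.toList_empty]⟩
          · exact ⟨String.ofList (d :: ds), by rw [hpartes1, pvWordsMax_zero _ (by simp [hu]), hu]; simp,
              by simp [String.toList_ofList]⟩
        obtain ⟨su, hsu, hsul⟩ := hnext
        have hstep : limpiarA_loop P s = limpiarA_loop P su := by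
          rw [limpiarA_loop]
          rw [dif_pos (by rw [hpartes1]; exact ⟨by simp, by simpa using hb⟩)]
          rw [hsu]
        have hlen : su.toList.length ≤ n := by
          rw [hsul]
          have := List.length_dropWhile_le PySem.Chars.isspace r
          omega
        rw [hstep, ih su hlen]
        -- remains: pvAltCore P su = pvAltCore P s
        have hWu : pvWords su.toList = pvWords r := by rw [hsul]; exact pvWords_lstrip r
        have hMu : ∀ m, pvWordsMax m su.toList = pvWordsMax m r := by
          intro m; rw [hsul]; exact pvWordsMax_lstrip m r
        rw [pvAltCore, pvAltCore]
        rw [pvStrSplit₀_eq, pvStrSplit₀_eq, hWu, ← hts, hW]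
        simp only [List.map_cons, List.takeWhile_cons, decide_eq_true_eq, hb, if_pos hb,
          List.length_cons, decide_true, if_true]
        set i := (List.takeWhile (fun w => decide (PySem.Str.lower w ∈ P))
            (List.map String.ofList (pvWords r))).length with hi
        rcases Nat.eq_zero_or_pos i with hiz | hip
        · rw [hiz]
          simp only [if_true, Nat.zero_add]
          rw [if_neg (by omega)]
          rw [pvStrSplit₀Max_eq s 1, ← hts, hM1]
          rcases hu : r.dropWhile PySem.Chars.isspace with _ | ⟨d, ds⟩
          · rw [pvWordsMax_of_nil 0 _ hu]
            have hsu0 : su = "" := String.toList_inj.mp (by rw [hsul, hu, String.toList_empty])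
            rw [hsu0]
            simp
          · rw [pvWordsMax_zero _ (by simp [hu]), hu]
            have hsu0 : su = String.ofList (d :: ds) :=
              String.toList_inj.mp (by rw [hsul, hu, String.toList_ofList])
            rw [hsu0]
            simp
        · rw [if_neg (show ¬ i = 0 by omega), if_neg (show ¬ i + 1 = 0 by omega)]
          rw [pvStrSplit₀Max_eq su i, hMu i, pvStrSplit₀Max_eq s (i + 1), ← hts,
            pvWordsMax_pos (i + 1) t h0 (by omega)]
          simp only [Nat.add_sub_cancel, List.map_cons, List.length_cons, List.getD_cons_succ,
            List.length_map]
          simp only [← hr]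
          by_cases hil : i < (pvWordsMax i r).length
          · rw [if_pos (by simpa using hil), if_pos (by simp; omega)]
          · rw [if_neg (by simpa using hil), if_neg (by simp; omega)]
      · -- the first word stays: both programs return s unchanged
        have hA : limpiarA_loop P s = s := by
          rw [limpiarA_loop]
          rw [dif_neg]
          rw [hpartes1]
          rintro ⟨-, hmem⟩
          simp at hmem
          exact hb hmem
        have hB : pvAltCore P s = s := by
          rw [pvAltCore]
          rw [pvStrSplit₀_eq, ← hts, hW]
          simp [List.takeWhile_cons, hb]
        rw [hA, hB]

-- ===== VERDICT (by name: the statement is the Claim_ definition above) =====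
theorem limpiar_inicio_spec : Claim_equal_limpiar_inicio := by
  intro sentence palabras_ini _
  show limpiar_inicio sentence palabras_ini = limpiar_inicio_alt sentence palabras_ini
  rw [limpiar_inicio, pvAlt_eq]
  exact pvMaster palabras_ini (PySem.Str.strip sentence).toList.length
    (PySem.Str.strip sentence) le_rfl
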